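-- pv_equiv track=rewrite | github.com/Arondiri/geunyang | 5.First Word.py | first_word
-- ===== SOURCE A (Python) =====
-- def first_word(text: str) -> str:
--     a = 0
--     b = 0
--     for i in range(len(text)):
--         if text[i] != " " and text[i] != "," and text[i] != ".":
--             a = i
--             break
--     if ' ' in text[a:] or ',' in text[a:] or '.' in text[a:]:
--         for i in range(a,len(text)):
--             if text[i] == " " or text[i] == "," or text [i] == ".":
--                 b = i
--                 break
--         return text[a:b]
--     else:
--         return text[a:]
-- ===== SOURCE B (Python) =====
-- import re
--
-- def first_word(text: str) -> str:
--     m = re.search(r'[^ ,.]+', text)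
--     return m.group() if m else ""
-- ===== Notes on version B (the rewrite author's own statement) =====
-- stated objective: idiomatic
-- what changed: Replaced the two manual index loops and slicing with a single regex search for the first maximal run of non-delimiter characters (equivalently dropWhile/takeWhile in the port).
import Mathlib
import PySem

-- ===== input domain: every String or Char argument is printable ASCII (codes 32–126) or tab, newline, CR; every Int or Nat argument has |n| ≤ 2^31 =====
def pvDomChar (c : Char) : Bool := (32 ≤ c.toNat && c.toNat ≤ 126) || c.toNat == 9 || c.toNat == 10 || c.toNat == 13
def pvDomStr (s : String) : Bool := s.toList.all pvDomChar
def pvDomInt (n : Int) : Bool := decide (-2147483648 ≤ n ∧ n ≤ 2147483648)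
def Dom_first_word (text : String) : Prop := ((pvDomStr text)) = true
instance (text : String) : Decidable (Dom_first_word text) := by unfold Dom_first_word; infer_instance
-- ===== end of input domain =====

-- B finds the first word with one regex search (drop-delimiters then take-word) instead of A's two manual index loops; objective: idiomatic.


-- ===== PORT A =====
-- delimiter test shared verbatim by both ports (space, comma, period)
def fwDelim (c : Char) : Bool := c == ' ' || c == ',' || c == '.'

-- A's first loop: first index whose character is not a delimiter (break), else none (a stays 0)
def fwFindStart : List Char → Nat → Option Nat
  | [], _ => none
  | c :: cs, i => if fwDelim c then fwFindStart cs (i + 1) else some i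

-- A's second loop: first index (absolute, starting at i) whose character is a delimiter
def fwFindDelim : List Char → Nat → Option Nat
  | [], _ => none
  | c :: cs, i => if fwDelim c then some i else fwFindDelim cs (i + 1)

-- A's body over the character list: find a, test membership of a delimiter in text[a:], find b, slice
def fwCore (cs : List Char) : List Char :=
  let a := (fwFindStart cs 0).getD 0
  let tail := cs.drop a            -- text[a:]
  if tail.any fwDelim then         -- ' ' in text[a:] or ',' in text[a:] or '.' in text[a:]
    let b := (fwFindDelim tail a).getD 0
    tail.take (b - a)              -- text[a:b]
  else
    tail                           -- text[a:]

def first_word (text : String) : String := String.mk (fwCore text.toList)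

-- ===== PORT B =====
-- re.search(r'[^ ,.]+', text): skip leading delimiters, then take the maximal run of non-delimiters
def first_word_alt (text : String) : String :=
  String.mk ((text.toList.dropWhile fwDelim).takeWhile (fun c => !fwDelim c))

-- ===== PRECONDITION & SPEC =====
def Spec_first_word (text : String) (out : String) : Prop := out = first_word_alt text
instance (text : String) (out : String) : Decidable (Spec_first_word text out) := by unfold Spec_first_word; infer_instance

-- ===== CLAIM (what is proved, stated in full; the proofs are below) =====
def Claim_equal_first_word : Prop := ∀ (text : String), Dom_first_word text → Spec_first_word text (first_word text)

-- ===== LEMMAS AND PROOFS =====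

theorem fwFindStart_none {l : List Char} {i : Nat}
    (h : fwFindStart l i = none) : ∀ c ∈ l, fwDelim c = true := by
  induction l generalizing i with
  | nil => intro c hc; cases hc
  | cons c cs ih =>
    intro d hd
    by_cases hc : fwDelim c = true
    · rcases List.mem_cons.1 hd with h' | h'
      · exact h' ▸ hc
      · exact ih (by simpa [fwFindStart, hc] using h) d h'
    · simp [fwFindStart, hc] at h

theorem fwFindStart_some {l : List Char} {i a : Nat}
    (h : fwFindStart l i = some a) :
    ∃ k, a = k + i ∧ l.drop k = l.dropWhile fwDelim := by
  induction l generalizing i a with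
  | nil => simp [fwFindStart] at h
  | cons c cs ih =>
    by_cases hc : fwDelim c = true
    · rcases ih (i := i + 1) (by simpa [fwFindStart, hc] using h) with ⟨k, hk, hdrop⟩
      exact ⟨k + 1, by omega, by simpa [List.dropWhile, hc] using hdrop⟩
    · have : i = a := by simpa [fwFindStart, hc] using h
      exact ⟨0, by omega, by simp [List.dropWhile, hc]⟩

theorem fwFindDelim_some {l : List Char} (i : Nat)
    (h : l.any fwDelim = true) :
    ∃ r, fwFindDelim l i = some (r + i) ∧ l.take r = l.takeWhile (fun c => !fwDelim c) := by
  induction l generalizing i with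
  | nil => simp at h
  | cons c cs ih =>
    by_cases hc : fwDelim c = true
    · exact ⟨0, by simp [fwFindDelim, hc], by simp [List.takeWhile, hc]⟩
    · have hcs : cs.any fwDelim = true := by
        simpa [hc] using h
      rcases ih (i := i + 1) hcs with ⟨r, hfind, htake⟩
      refine ⟨r + 1, ?_, ?_⟩
      · simp [fwFindDelim, hc, hfind]; omega
      · simp [List.takeWhile, hc, htake]

theorem takeWhile_all {l : List Char} (h : ∀ c ∈ l, fwDelim c = false) :
    l.takeWhile (fun c => !fwDelim c) = l := by
  induction l with
  | nil => rfl
  | cons c cs ih =>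
    have hc := h c (by simp)
    simp [List.takeWhile, hc, ih fun d hd => h d (by simp [hd])]

theorem dropWhile_all {l : List Char} (h : ∀ c ∈ l, fwDelim c = true) :
    l.dropWhile fwDelim = [] := by
  induction l with
  | nil => rfl
  | cons c cs ih =>
    simp [List.dropWhile, h c (by simp), ih fun d hd => h d (by simp [hd])]

theorem fwCore_eq (l : List Char) :
    fwCore l = (l.dropWhile fwDelim).takeWhile (fun c => !fwDelim c) := by
  unfold fwCore
  cases hs : fwFindStart l 0 with
  | none =>
    have hall := fwFindStart_none hs
    have hdrop : l.dropWhile fwDelim = [] := dropWhile_all hall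
    simp only [Option.getD_none, List.drop_zero, hdrop, List.takeWhile_nil]
    cases l with
    | nil => simp
    | cons c cs =>
      have hc : fwDelim c = true := hall c (by simp)
      simp [fwFindDelim, hc]
  | some a =>
    rcases fwFindStart_some hs with ⟨k, hk, hdropk⟩
    rw [Nat.add_zero] at hk
    subst hk
    simp only [Option.getD_some]
    by_cases hany : (l.drop a).any fwDelim = true
    · rcases fwFindDelim_some (l := l.drop a) a hany with ⟨r, hfind, htake⟩
      rw [if_pos hany, hfind]
      simp only [Option.getD_some, Nat.add_sub_cancel]
      rw [htake, hdropk]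
    · have hnone : ∀ c ∈ l.drop a, fwDelim c = false := by
        intro c hc
        by_contra h
        exact hany (List.any_eq_true.2 ⟨c, hc, by simpa using h⟩)
      rw [if_neg hany, hdropk]
      exact (takeWhile_all (hdropk ▸ hnone)).symm

-- ===== VERDICT (by name: the statement is the Claim_ definition above) =====
theorem first_word_spec : Claim_equal_first_word := by
  intro text _
  unfold Spec_first_word first_word first_word_alt
  rw [fwCore_eq]
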